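-- pv_equiv track=rewrite | github.com/pabloschwarzenberg/grader | hito2_ej3/hito2_ej3_9d5e1f2f87d58c4b98dd3e2175e42313.py | encontrar_subsecuencias
-- ===== SOURCE A (Python) =====
-- def encontrar_subsecuencias(secuencia, n):
--     subsecuencias = []
--     frecuencias = {}
--
--     for i in range(len(secuencia) - n + 1):
--         subsecuencia = secuencia[i:i+n]
--         if subsecuencia in frecuencias:
--             frecuencias[subsecuencia] += 1
--         else:
--             frecuencias[subsecuencia] = 1
--
--     for subsecuencia, frecuencia in frecuencias.items():
--         if frecuencia == 1:
--             subsecuencias.append(subsecuencia)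
--
--     return subsecuencias
-- ===== SOURCE B (Python) =====
-- def encontrar_subsecuencias(secuencia, n):
--     pares = [(secuencia[i:i+n], i) for i in range(len(secuencia) - n + 1)]
--     pares = sorted(pares, key=lambda p: p[0])
--     unicos = []
--     j = 0
--     while j < len(pares):
--         k = j + 1
--         while k < len(pares) and pares[k][0] == pares[j][0]:
--             k += 1
--         if k - j == 1:
--             unicos.append(pares[j])
--         j = k
--     unicos = sorted(unicos, key=lambda p: p[1])
--     return [w for w, _ in unicos]
-- ===== Notes on version B (the rewrite author's own statement) =====
-- stated objective: alternative
-- what changed: Replaces A's hash-frequency dict with a sort-and-group scan: pair each window with its index, sort by window, keep the windows whose run of equal neighbours is a singleton, then re-sort the kept pairs by index to restore first-occurrence order.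
import Mathlib
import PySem

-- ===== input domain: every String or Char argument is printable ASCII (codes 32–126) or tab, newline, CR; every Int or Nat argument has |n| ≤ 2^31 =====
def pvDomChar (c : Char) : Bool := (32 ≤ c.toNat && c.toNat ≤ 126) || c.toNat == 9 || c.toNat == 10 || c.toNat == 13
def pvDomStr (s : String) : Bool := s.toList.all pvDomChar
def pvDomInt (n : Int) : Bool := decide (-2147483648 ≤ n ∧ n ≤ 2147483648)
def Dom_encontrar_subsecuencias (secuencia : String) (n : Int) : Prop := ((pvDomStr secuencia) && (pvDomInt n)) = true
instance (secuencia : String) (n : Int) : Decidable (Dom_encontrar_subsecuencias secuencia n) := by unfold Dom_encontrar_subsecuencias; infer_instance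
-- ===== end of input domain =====

-- B replaces A's hash-frequency dict by sort-group-rescan: pair each window with its index,
-- sort by window, keep the windows whose group of equal neighbours is a singleton, and
-- restore first-occurrence order by re-sorting the kept pairs by index (objective: alternative).

-- ===== PORT A =====
def encontrar_subsecuencias (secuencia : String) (n : Int) : List String :=
  let subsecuencias : List String := []
  let frecuencias : PySem.Dict String Int := PySem.Dict.empty
  let frecuencias :=
    (PySem.List.pyRange 0 (PySem.Str.len secuencia - n + 1) 1).foldl
      (fun frecuencias i =>
        let subsecuencia := PySem.Str.slice secuencia (some i) (some (i + n))
        if frecuencias.contains subsecuencia then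
          frecuencias.insert subsecuencia (frecuencias.getD subsecuencia 0 + 1)
        else
          frecuencias.insert subsecuencia 1)
      frecuencias
  frecuencias.items.foldl
    (fun subsecuencias p => if p.2 == 1 then subsecuencias ++ [p.1] else subsecuencias)
    subsecuencias

-- ===== PORT B =====
-- Source B's sorted(..., key=...) is ported as Lean's stable sort List.mergeSort on the key
-- (Python's sorted is a stable sort; for a linear key order any stable sort computes the
-- same list, and mergeSort evaluates on large inputs where an insertion sort cannot).
def pySortKey {a k : Type} [LinearOrder k] (l : List a) (key : a → k) : List a :=
  l.mergeSort (fun x y => decide (key x ≤ key y))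

-- Source B's grouping while-loop: the inner while (advance k over equal windows) is
-- takeWhile/dropWhile on the remaining pairs, the outer while is the recursion.
def pvSpanSingles : List (String × Int) → List (String × Int)
  | [] => []
  | p :: rest =>
      let same := rest.takeWhile (fun q => q.1 == p.1)
      let resto := rest.dropWhile (fun q => q.1 == p.1)
      (if same.length == 0 then [p] else []) ++ pvSpanSingles resto
termination_by l => l.length
decreasing_by
  simp only [List.length_cons]
  exact Nat.lt_succ_of_le (List.length_dropWhile_le _ _)

def encontrar_subsecuencias_alt (secuencia : String) (n : Int) : List String :=
  let pares :=
    (PySem.List.pyRange 0 (PySem.Str.len secuencia - n + 1) 1).map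
      (fun i => (PySem.Str.slice secuencia (some i) (some (i + n)), i))
  let pares := pySortKey pares (fun p => p.1)
  let unicos := pvSpanSingles pares
  let unicos := pySortKey unicos (fun p => p.2)
  unicos.map (fun p => p.1)

-- ===== PRECONDITION & SPEC =====
def Spec_encontrar_subsecuencias (secuencia : String) (n : Int) (out : List String) : Prop := out = encontrar_subsecuencias_alt secuencia n
instance (secuencia : String) (n : Int) (out : List String) : Decidable (Spec_encontrar_subsecuencias secuencia n out) := by unfold Spec_encontrar_subsecuencias; infer_instance

-- ===== CLAIM (what is proved, stated in full; the proofs are below) =====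
def Claim_equal_encontrar_subsecuencias : Prop := ∀ (secuencia : String) (n : Int), Dom_encontrar_subsecuencias secuencia n → Spec_encontrar_subsecuencias secuencia n (encontrar_subsecuencias secuencia n)

-- ===== LEMMAS AND PROOFS =====

-- the windows list both ports compute
def pvWindows (secuencia : String) (n : Int) : List String :=
  (PySem.List.pyRange 0 (PySem.Str.len secuencia - n + 1) 1).map
    (fun i => PySem.Str.slice secuencia (some i) (some (i + n)))

-- A's dict update step is exactly "insert (getD + 1)"
theorem pv_stepA (d : PySem.Dict String Int) (w : String) :
    (if d.contains w then d.insert w (d.getD w 0 + 1) else d.insert w 1) =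
      d.insert w (d.getD w 0 + 1) := by
  by_cases h : d.contains w
  · simp [h]
  · have hb : d.contains w = false := by simpa using h
    rw [PySem.Dict.getD_of_not_contains _ _ hb]
    simp [hb]


theorem pv_A_eq (secuencia : String) (n : Int) :
    encontrar_subsecuencias secuencia n =
      (PySem.Set.ofList (pvWindows secuencia n)).filter
        (fun k => ((List.count k (pvWindows secuencia n) : Int) == 1)) := by
  unfold encontrar_subsecuencias
  simp only []
  have h1 :
      (PySem.List.pyRange 0 (PySem.Str.len secuencia - n + 1) 1).foldl
        (fun frecuencias i =>
          let subsecuencia := PySem.Str.slice secuencia (some i) (some (i + n))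
          if frecuencias.contains subsecuencia then
            frecuencias.insert subsecuencia (frecuencias.getD subsecuencia 0 + 1)
          else
            frecuencias.insert subsecuencia 1)
        PySem.Dict.empty = PySem.Dict.counter (pvWindows secuencia n) := by
    rw [pvWindows, ← PySem.Dict.foldl_insert_getD_add_one_eq_counter, List.foldl_map]
    exact PySem.List.foldl_congr_mem _ _ _ _ (fun d i _ => pv_stepA d (PySem.Str.slice secuencia (some i) (some (i + n))))
  rw [h1]
  rw [PySem.List.foldl_append_if (fun p => p.2 == 1) Prod.fst]
  rw [PySem.Dict.items_counter, List.filter_map]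
  simp [Function.comp_def]

theorem pv_filter_ofList (ws : List String) (q : String → Bool)
    (h : ∀ a, q a = true → List.count a ws ≤ 1) :
    (PySem.Set.ofList ws).filter q = ws.filter q := by
  induction ws using List.reverseRecOn with
  | nil => simp [PySem.Set.ofList_nil]
  | append_singleton ws x ih =>
    rw [PySem.Set.ofList_append_singleton]
    by_cases hx : x ∈ ws
    · have hq : q x = false := by
        by_contra hq
        have hq' : q x = true := by simpa using hq
        have := h x hq'
        have h2 : 2 ≤ List.count x (ws ++ [x]) := by
          rw [List.count_append]
          have := List.one_le_count_iff.mpr hx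
          simp
          omega
        omega
      rw [PySem.Set.add_of_mem (by simpa [PySem.Set.mem_ofList] using hx)]
      rw [List.filter_append]
      simp [hq]
      exact ih (fun a ha => le_trans (by rw [List.count_append]; omega) (h a ha))
    · rw [PySem.Set.add_of_not_mem (by simpa [PySem.Set.mem_ofList] using hx)]
      rw [List.filter_append, List.filter_append]
      congr 1
      exact ih (fun a ha => le_trans (by rw [List.count_append]; omega) (h a ha))

theorem pv_dropWhile_head_not {α : Type} (P : α → Bool) (l : List α) (h0 : α) (t : List α)
    (h : l.dropWhile P = h0 :: t) : P h0 = false := by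
  induction l with
  | nil => simp at h
  | cons x xs ih =>
    rw [List.dropWhile_cons] at h
    by_cases hx : P x
    · exact ih (by simpa [hx] using h)
    · have hxf : P x = false := by simpa using hx
      rw [hxf] at h
      simp at h
      obtain ⟨rfl, -⟩ := h
      exact hxf


theorem pv_spanSingles_eq_aux (N : Nat) : ∀ (l : List (String × Int)), l.length ≤ N →
    List.Pairwise (fun a b => a.1 ≤ b.1) l →
    pvSpanSingles l = l.filter (fun p => (List.count p.1 (l.map Prod.fst) == 1)) := by
  induction N with
  | zero =>
    intro l hl _
    have : l = [] := List.eq_nil_of_length_eq_zero (Nat.le_zero.mp hl)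
    subst this; simp [pvSpanSingles]
  | succ N ih =>
    intro l hl hs
    match l with
    | [] => simp [pvSpanSingles]
    | p :: rest =>
      obtain ⟨hp, hrest⟩ := List.pairwise_cons.mp hs
      set s := rest.takeWhile (fun q => q.1 == p.1) with hs_def
      set r := rest.dropWhile (fun q => q.1 == p.1) with hr_def
      have hsr : s ++ r = rest := List.takeWhile_append_dropWhile
      have f1 : ∀ q ∈ s, q.1 = p.1 := fun q hq => by
        simpa using List.mem_takeWhile_imp hq
      have hrpair : List.Pairwise (fun a b => a.1 ≤ b.1) r :=
        List.Pairwise.sublist (List.dropWhile_sublist _) hrest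
      have f2 : ∀ q ∈ r, p.1 < q.1 := by
        intro q hq
        match hr : r, hq with
        | h0 :: t, hq =>
          have hne : h0.1 ≠ p.1 := by
            have hPfalse := pv_dropWhile_head_not (fun q : String × Int => q.1 == p.1) rest h0 t
              (by rw [← hr_def]; exact hr)
            simpa using hPfalse
          have hmem : h0 ∈ rest := by
            rw [← hsr, hr]; simp
          have hlt : p.1 < h0.1 := lt_of_le_of_ne (hp h0 hmem) (Ne.symm hne)
          rcases List.mem_cons.mp hq with rfl | hqt
          · exact hlt
          · rw [hr] at hrpair
            exact lt_of_lt_of_le hlt ((List.pairwise_cons.mp hrpair).1 q hqt)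
      have f3 : List.count p.1 ((p :: (s ++ r)).map Prod.fst) = 1 + s.length := by
        simp only [List.map_cons, List.map_append, List.count_cons, List.count_append]
        have c1 : List.count p.1 (s.map Prod.fst) = s.length := by
          have hc : List.count p.1 (s.map Prod.fst) = (s.map Prod.fst).length := by
            rw [List.count_eq_length]
            intro b hb
            obtain ⟨w, hw, hw1⟩ := List.mem_map.mp hb
            rw [← hw1, f1 w hw]
          rwa [List.length_map] at hc
        have c2 : List.count p.1 (r.map Prod.fst) = 0 := by
          rw [List.count_eq_zero]
          intro hmem
          obtain ⟨q, hq, hq1⟩ := List.mem_map.mp hmem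
          exact absurd hq1 (ne_of_gt (f2 q hq))
        simp [c1, c2]
        omega
      have f4 : ∀ q ∈ r, List.count q.1 ((p :: (s ++ r)).map Prod.fst)
          = List.count q.1 (r.map Prod.fst) := by
        intro q hq
        simp only [List.map_cons, List.map_append, List.count_cons, List.count_append]
        have c0 : (q.1 == p.1) = false := by
          simpa using ne_of_gt (f2 q hq)
        have c1 : List.count q.1 (s.map Prod.fst) = 0 := by
          rw [List.count_eq_zero]
          intro hmem
          obtain ⟨w, hw, hw1⟩ := List.mem_map.mp hmem
          rw [f1 w hw] at hw1
          exact absurd hw1 (ne_of_lt (f2 q hq))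
        simp [c1]
        exact ne_of_lt (f2 q hq)
      -- unfold one step
      rw [pvSpanSingles]
      simp only [← hs_def, ← hr_def]
      have hlen : r.length ≤ N := by
        have h1 : r.length ≤ rest.length := by
          rw [hr_def]; exact List.length_dropWhile_le _ _
        have h2 : (p :: rest).length = rest.length + 1 := by simp
        omega
      rw [ih r hlen hrpair]
      -- now compute the RHS filter
      conv_rhs => rw [show (p :: rest) = p :: (s ++ r) by rw [hsr]]
      rw [List.filter_cons, List.filter_append]
      have e1 : s.filter (fun q => (List.count q.1 ((p :: (s ++ r)).map Prod.fst) == 1)) = [] := by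
        rw [List.filter_eq_nil_iff]
        intro q hq
        have hc : List.count q.1 ((p :: (s ++ r)).map Prod.fst) = 1 + s.length := by
          rw [f1 q hq]; exact f3
        have hpos : 1 ≤ s.length := List.length_pos_of_mem hq
        simp only [hc, beq_iff_eq]
        omega
      have e2 : r.filter (fun q => (List.count q.1 ((p :: (s ++ r)).map Prod.fst) == 1))
          = r.filter (fun q => (List.count q.1 (r.map Prod.fst) == 1)) :=
        List.filter_congr (fun q hq => by rw [f4 q hq])
      rw [e1, e2, f3]
      have e3 : ((1 + s.length : Nat) == 1) = (s.length == 0) := by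
        by_cases h0 : s.length = 0
        · simp [h0]
        · have hne : 1 + s.length ≠ 1 := by omega
          simp [h0]
      rw [e3]
      by_cases h0 : s.length = 0
      · simp [h0]
      · simp [h0]


-- a permutation that is strictly key-sorted is THE key-sorted rearrangement
theorem pv_perm_pairwise_eq {a k : Type} [LinearOrder k] (key : a → k) :
    ∀ (xs ys : List a), xs.Perm ys → xs.Pairwise (fun u v => key u ≤ key v) →
      ys.Pairwise (fun u v => key u < key v) → xs = ys := by
  intro xs ys h hx hy
  induction ys generalizing xs with
  | nil => exact h.eq_nil
  | cons y yt ih =>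
    match xs, h with
    | [], h => exact absurd h.length_eq (by simp)
    | x :: xt, h =>
      obtain ⟨hxm, hxp⟩ := List.pairwise_cons.mp hx
      obtain ⟨hym, hyp⟩ := List.pairwise_cons.mp hy
      have hxy : x = y := by
        by_contra hne
        have hxin : x ∈ y :: yt := h.mem_iff.mp List.mem_cons_self
        have hyin : y ∈ x :: xt := h.mem_iff.mpr List.mem_cons_self
        rcases List.mem_cons.mp hxin with rfl | hxt
        · exact hne rfl
        rcases List.mem_cons.mp hyin with rfl | hyt
        · exact hne rfl
        exact absurd (hxm y hyt) (not_le.mpr (hym x hxt))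
      subst hxy
      exact congrArg (x :: ·) (ih xt (h.cons_inv) hxp hyp)

theorem pv_pySortKey_perm {a k : Type} [LinearOrder k] (l : List a) (key : a → k) :
    (pySortKey l key).Perm l := List.mergeSort_perm l _

theorem pv_pySortKey_pairwise {a k : Type} [LinearOrder k] (l : List a) (key : a → k) :
    (pySortKey l key).Pairwise (fun u v => key u ≤ key v) := by
  have h := List.pairwise_mergeSort (le := fun x y : a => decide (key x ≤ key y))
    (fun u v w huv hvw => by
      simp only [decide_eq_true_eq] at *
      exact le_trans huv hvw)
    (fun u v => by
      simp only [Bool.or_eq_true, decide_eq_true_eq]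
      exact le_total (key u) (key v)) l
  exact h.imp (fun hb => by simpa using hb)

theorem pv_pySortKey_eq_of_pairwise_lt {a k : Type} [LinearOrder k] (l ys : List a)
    (key : a → k) (hperm : ys.Perm l) (hlt : ys.Pairwise (fun u v => key u < key v)) :
    pySortKey l key = ys :=
  pv_perm_pairwise_eq key _ _ ((pv_pySortKey_perm l key).trans hperm.symm)
    (pv_pySortKey_pairwise l key) hlt

theorem pv_B_eq (secuencia : String) (n : Int) :
    encontrar_subsecuencias_alt secuencia n =
      (pvWindows secuencia n).filter
        (fun k => (List.count k (pvWindows secuencia n) == 1)) := by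
  unfold encontrar_subsecuencias_alt
  simp only []
  set pares := (PySem.List.pyRange 0 (PySem.Str.len secuencia - n + 1) 1).map
      (fun i => (PySem.Str.slice secuencia (some i) (some (i + n)), i)) with hpares
  set ords := pySortKey pares (fun p => p.1) with hords
  have hwin : pares.map Prod.fst = pvWindows secuencia n := by
    rw [hpares, pvWindows, List.map_map]
    rfl
  have hcount : ∀ a, List.count a (ords.map Prod.fst) = List.count a (pares.map Prod.fst) := by
    intro a
    exact ((pv_pySortKey_perm pares (fun p => p.1)).map Prod.fst).count_eq a
  have h1 : pvSpanSingles ords =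
      ords.filter (fun q => (List.count q.1 (ords.map Prod.fst) == 1)) :=
    pv_spanSingles_eq_aux ords.length ords le_rfl
      (pv_pySortKey_pairwise pares (fun p => p.1))
  have h2 : ords.filter (fun q => (List.count q.1 (ords.map Prod.fst) == 1)) =
      ords.filter (fun q => (List.count q.1 (pares.map Prod.fst) == 1)) :=
    List.filter_congr (fun q _ => by rw [hcount])
  have h3 : (ords.filter (fun q => (List.count q.1 (pares.map Prod.fst) == 1))).Perm
      (pares.filter (fun q => (List.count q.1 (pares.map Prod.fst) == 1))) :=
    (pv_pySortKey_perm pares (fun p => p.1)).filter _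
  have h4 : (pares.filter (fun q => (List.count q.1 (pares.map Prod.fst) == 1))).Pairwise
      (fun u v => u.2 < v.2) := by
    apply List.Pairwise.sublist List.filter_sublist
    rw [hpares]
    exact List.pairwise_map.mpr (PySem.List.pairwise_lt_pyRange_one 0 (PySem.Str.len secuencia - n + 1))
  have h5 : pySortKey
        (ords.filter (fun q => (List.count q.1 (pares.map Prod.fst) == 1))) (fun p => p.2)
      = pares.filter (fun q => (List.count q.1 (pares.map Prod.fst) == 1)) :=
    pv_pySortKey_eq_of_pairwise_lt _ _ _ h3.symm h4
  rw [h1, h2, h5]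
  conv_rhs => rw [← hwin, List.filter_map]
  rfl

-- ===== VERDICT (by name: the statement is the Claim_ definition above) =====
theorem encontrar_subsecuencias_spec : Claim_equal_encontrar_subsecuencias := by
  intro secuencia n _
  unfold Spec_encontrar_subsecuencias
  rw [pv_A_eq, pv_B_eq, pv_filter_ofList]
  · apply List.filter_congr
    intro x _
    simp
  · intro a ha
    simp only [beq_iff_eq] at ha
    exact_mod_cast le_of_eq ha
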